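-- pv_equiv track=rewrite | github.com/Wowfunhappy/Chocolat-Modifier | Helper Scripts/FilterActionMenus.py | clean_separators_in_list
-- ===== SOURCE A (Python) =====
-- def clean_separators_in_list(items):
--     """Remove leading, trailing, and consecutive separators from a list"""
--     if not items:
--         return items
--
--     # Remove leading separators
--     while items and items[0] == '---':
--         items = items[1:]
--
--     # Remove trailing separators
--     while items and items[-1] == '---':
--         items = items[:-1]
--
--     # Remove consecutive separators
--     cleaned = []
--     prev_was_separator = False
--     for item in items:
--         if item == '---':
--             if not prev_was_separator:
--                 cleaned.append(item)
--             prev_was_separator = True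
--         else:
--             cleaned.append(item)
--             prev_was_separator = False
--
--     return cleaned
-- ===== SOURCE B (Python) =====
-- def clean_separators_in_list(items):
--     """Remove leading, trailing, and consecutive separators from a list.
--
--     Single forward pass: a separator is emitted only when the output already
--     ends with a non-separator item (which kills leading and consecutive
--     separators at once); one final pop removes the at-most-one trailing one.
--     """
--     out = []
--     for item in items:
--         if item != '---':
--             out.append(item)
--         elif out and out[-1] != '---':
--             out.append('---')
--     if out and out[-1] == '---':
--         out.pop()
--     return out
-- ===== Notes on version B (the rewrite author's own statement) =====
-- stated objective: simpler
-- what changed: Replaced A's three phases (repeated slicing to strip leading separators, repeated slicing to strip trailing ones, then a prev-flag collapse loop) by a single forward pass that emits a separator only when the output already ends with a non-separator (killing leading and consecutive separators at once) plus one final pop for the at-most-one trailing separator.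
import Mathlib
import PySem

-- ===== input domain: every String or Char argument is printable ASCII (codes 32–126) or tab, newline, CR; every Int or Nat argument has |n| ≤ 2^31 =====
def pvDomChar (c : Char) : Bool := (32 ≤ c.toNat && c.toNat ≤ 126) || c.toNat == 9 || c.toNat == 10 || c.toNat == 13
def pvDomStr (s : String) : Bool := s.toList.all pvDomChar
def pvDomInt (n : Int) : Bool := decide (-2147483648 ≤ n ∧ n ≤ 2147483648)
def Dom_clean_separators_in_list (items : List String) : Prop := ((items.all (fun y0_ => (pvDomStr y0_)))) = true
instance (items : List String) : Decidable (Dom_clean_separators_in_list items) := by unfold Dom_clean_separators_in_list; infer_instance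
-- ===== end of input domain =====

-- B replaces A's three passes (two slicing strip loops + a prev-flag collapse) by one
-- forward accumulator pass plus a final pop; objective: simpler. Return values only (no mutation in either).

-- ===== PORT A =====
-- while items and items[0] == '---': items = items[1:]
def aDropLead : List String → List String
  | [] => []
  | x :: xs => if x == "---" then aDropLead xs else x :: xs

-- while items and items[-1] == '---': items = items[:-1]
-- (items[-1] for nonempty items is getLast?; items[:-1] is dropLast)
def aDropTrail (l : List String) : List String :=
  if h : l ≠ [] ∧ l.getLast? = some "---" then aDropTrail l.dropLast else l

termination_by l.length
decreasing_by
  cases l with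
  | nil => exact absurd rfl h.1
  | cons a t => simp [List.length_dropLast]

-- the for-loop body over state (cleaned, prev_was_separator)
def aStep (s : List String × Bool) (item : String) : List String × Bool :=
  if item == "---" then (if s.2 then s else (s.1 ++ [item], true))
  else (s.1 ++ [item], false)

def clean_separators_in_list (items : List String) : List String :=
  if items = [] then items
  else ((aDropTrail (aDropLead items)).foldl aStep ([], false)).1

-- ===== PORT B =====
-- the for-loop body over the accumulator `out`
def bStep (out : List String) (item : String) : List String :=
  if item ≠ "---" then out ++ [item]
  else if out ≠ [] ∧ out.getLast? ≠ some "---" then out ++ ["---"] else out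

def clean_separators_in_list_alt (items : List String) : List String :=
  let out := items.foldl bStep []
  if out ≠ [] ∧ out.getLast? = some "---" then out.dropLast else out

-- ===== PRECONDITION & SPEC =====
def Spec_clean_separators_in_list (items : List String) (out : List String) : Prop := out = clean_separators_in_list_alt items
instance (items : List String) (out : List String) : Decidable (Spec_clean_separators_in_list items out) := by unfold Spec_clean_separators_in_list; infer_instance

-- ===== CLAIM (what is proved, stated in full; the proofs are below) =====
def Claim_equal_clean_separators_in_list : Prop := ∀ (items : List String), Dom_clean_separators_in_list items → Spec_clean_separators_in_list items (clean_separators_in_list items)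

-- ===== LEMMAS AND PROOFS =====

-- reversed-accumulator versions of the two loop bodies (cons instead of append)
def aR (s : List String × Bool) (x : String) : List String × Bool :=
  if x == "---" then (if s.2 then s else (x :: s.1, true)) else (x :: s.1, false)

def bR (r : List String) (x : String) : List String :=
  if x ≠ "---" then x :: r
  else if r ≠ [] ∧ r.head? ≠ some "---" then "---" :: r else r

def stripH (r : List String) : List String :=
  if r.head? = some "---" then r.tail else r

theorem foldl_bStep_rev (l : List String) : ∀ (out : List String),
    List.foldl bStep out l = (List.foldl bR out.reverse l).reverse := by
  induction l with
  | nil => intro out; simp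
  | cons x t ih =>
    intro out
    have hstep : bStep out x = (bR out.reverse x).reverse := by
      simp only [bStep, bR, List.head?_reverse]
      by_cases hx : x = "---"
      · simp only [hx]; split_ifs <;> simp_all
      · simp [hx]
    simp only [List.foldl_cons, hstep, ih, List.reverse_reverse]

theorem foldl_aStep_rev (l : List String) : ∀ (c : List String) (p : Bool),
    List.foldl aStep (c, p) l
      = ((List.foldl aR (c.reverse, p) l).1.reverse, (List.foldl aR (c.reverse, p) l).2) := by
  induction l with
  | nil => intro c p; simp
  | cons x t ih =>
    intro c p
    have hstep : aStep (c, p) x = ((aR (c.reverse, p) x).1.reverse, (aR (c.reverse, p) x).2) := by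
      simp only [aStep, aR]
      by_cases hx : x = "---"
      · cases p <;> simp [hx]
      · simp [hx]
    simp only [List.foldl_cons, hstep]
    rw [ih]
    simp

def good (s : List String × Bool) : Prop :=
  s.1 ≠ [] ∧ (s.2 = true ↔ s.1.head? = some "---")

-- simulation: from a good state with equal accumulators, A's reversed fold and B's reversed fold agree
theorem ab_sim (m : List String) : ∀ (s : List String × Bool), good s →
    (List.foldl aR s m).1 = List.foldl bR s.1 m ∧ good (List.foldl aR s m) := by
  induction m with
  | nil => intro s hs; exact ⟨rfl, hs⟩
  | cons x t ih =>
    intro s hs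
    have hstep : (aR s x).1 = bR s.1 x ∧ good (aR s x) := by
      obtain ⟨hne, hiff⟩ := hs
      by_cases hx : x = "---"
      · subst hx
        by_cases hp : s.2 = true
        · have hh : s.1.head? = some "---" := hiff.mp hp
          constructor
          · simp [aR, bR, hp, hh]
          · rw [show aR s "---" = s by simp [aR, hp]]; exact ⟨hne, hiff⟩
        · have hh : ¬ s.1.head? = some "---" := fun h => hp (hiff.mpr h)
          have hp' : s.2 = false := by cases hsb : s.2 <;> simp_all
          constructor
          · simp [aR, bR, hp', hne, hh]
          · simp [aR, hp', good]
      · constructor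
        · simp [aR, bR, hx]
        · simp [aR, hx, good]
    have := ih (aR s x) hstep.2
    refine ⟨?_, this.2⟩
    simpa [List.foldl_cons, hstep.1] using this.1

theorem aDropTrail_nil : aDropTrail [] = [] := by
  unfold aDropTrail; simp

theorem aDropTrail_concat_sep (m : List String) :
    aDropTrail (m ++ ["---"]) = aDropTrail m := by
  rw [aDropTrail]; simp

theorem aDropTrail_concat_ns (m : List String) (x : String) (hx : x ≠ "---") :
    aDropTrail (m ++ [x]) = m ++ [x] := by
  rw [aDropTrail]; simp [hx]

-- A with the trailing strip = strip of head of the reversed accumulator, for lists with non-sep head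
theorem trail_strip (m : List String)
    (hm : m = [] ∨ ∃ x₀ t, m = x₀ :: t ∧ x₀ ≠ "---") :
    stripH ((List.foldl aR ([], false) m).1)
      = (List.foldl aR ([], false) (aDropTrail m)).1 := by
  induction m using List.reverseRecOn with
  | nil => simp [aDropTrail_nil, stripH]
  | append_singleton m' x ih =>
    rcases hm with hm | ⟨x₀, t, hm, hx₀⟩
    · exact absurd hm (by simp)
    by_cases hx : x = "---"
    · subst hx
      have hm' : m' ≠ [] := by
        rintro rfl
        have : x₀ = "---" := by simpa using congrArg (List.head? (α := String)) hm.symm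
        exact hx₀ this
      obtain ⟨h₀, t', hm'eq⟩ : ∃ h₀ t', m' = h₀ :: t' := by
        cases m' with
        | nil => exact absurd rfl hm'
        | cons a b => exact ⟨a, b, rfl⟩
      have hhead : h₀ = x₀ := by
        have := hm
        rw [hm'eq] at this
        simpa using congrArg (List.head? (α := String)) this
      have hm'shape : m' = [] ∨ ∃ y t'', m' = y :: t'' ∧ y ≠ "---" :=
        Or.inr ⟨h₀, t', hm'eq, hhead ▸ hx₀⟩
      have ih' := ih hm'shape
      have hgood : good (List.foldl aR ([h₀], false) t') := by
        have := (ab_sim t' ([h₀], false) ⟨by simp, by simp [hhead, hx₀]⟩).2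
        exact this
      have hfold : List.foldl aR ([], false) m' = List.foldl aR ([h₀], false) t' := by
        rw [hm'eq]; simp [List.foldl_cons, aR, hhead, hx₀]
      rw [aDropTrail_concat_sep]
      rw [← ih']
      simp only [List.foldl_append, List.foldl_cons, List.foldl_nil]
      set s' := List.foldl aR ([], false) m' with hs'
      by_cases hp : s'.2 = true
      · simp [aR, hp]
      · have hp' : s'.2 = false := by cases h : s'.2 <;> simp_all
        have hgood' : good s' := by rw [hfold]; exact hgood
        have hh : ¬ s'.1.head? = some "---" := fun h => by
          have := hgood'.2.mpr h; simp [hp'] at this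
        simp [aR, hp', stripH, hh]
    · rw [aDropTrail_concat_ns m' x hx]
      simp only [List.foldl_append, List.foldl_cons, List.foldl_nil]
      simp [aR, hx, stripH]

-- main identity on reversed accumulators
theorem main_eq (items : List String) :
    stripH (List.foldl bR [] items)
      = (List.foldl aR ([], false) (aDropTrail (aDropLead items))).1 := by
  induction items with
  | nil => simp [aDropLead, aDropTrail_nil, stripH]
  | cons x t ih =>
    by_cases hx : x = "---"
    · subst hx
      have : bR [] "---" = [] := by simp [bR]
      simp only [List.foldl_cons, this, aDropLead]
      exact ih
    · have hdl : aDropLead (x :: t) = x :: t := by simp [aDropLead, hx]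
      rw [hdl]
      have hB : List.foldl bR [] (x :: t) = (List.foldl aR ([], false) (x :: t)).1 := by
        have hstep : bR [] x = [x] := by simp [bR, hx]
        have haR : aR ([], false) x = ([x], false) := by simp [aR, hx]
        have := (ab_sim t ([x], false) ⟨by simp, by simp [hx]⟩).1
        simp only [List.foldl_cons, hstep, haR]
        exact this.symm
      rw [hB]
      exact trail_strip (x :: t) (Or.inr ⟨x, t, rfl, hx⟩)

theorem dropLast_reverse' (r : List String) : r.reverse.dropLast = r.tail.reverse := by
  cases r with
  | nil => simp
  | cons a t => simp

-- alt expressed through the reversed world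
theorem alt_char (items : List String) :
    clean_separators_in_list_alt items = (stripH (List.foldl bR [] items)).reverse := by
  unfold clean_separators_in_list_alt
  rw [foldl_bStep_rev items []]
  simp only [List.reverse_nil]
  generalize List.foldl bR [] items = r
  by_cases hh : r.head? = some "---"
  · have hne : r.reverse ≠ [] := by
      cases r with
      | nil => simp at hh
      | cons a t => simp
    simp only [stripH, if_pos hh]
    rw [if_pos ⟨hne, by simpa [List.getLast?_reverse] using hh⟩]
    exact dropLast_reverse' r
  · simp only [stripH, if_neg hh]
    rw [if_neg]
    rintro ⟨hne, hlast⟩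
    exact hh (by simpa [List.getLast?_reverse] using hlast)

-- ===== VERDICT (by name: the statement is the Claim_ definition above) =====
theorem clean_separators_in_list_spec : Claim_equal_clean_separators_in_list := by
  intro items _
  unfold Spec_clean_separators_in_list
  rw [alt_char, main_eq]
  unfold clean_separators_in_list
  by_cases hnil : items = []
  · subst hnil; simp [aDropLead, aDropTrail_nil]
  · rw [if_neg hnil, foldl_aStep_rev]
    simp
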